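-- pv_equiv track=rewrite | github.com/DivyankR/Programming-Assignments-FSDS- | P_Assignment23.py | multiply_nums
-- ===== SOURCE A (Python) =====
-- import string
--
-- def multiply_nums(s):
--     l=[]
--     c=""
--     for i in range(len(s)):
--         if s[i] not in string.punctuation :
--             c+=s[i]
--         if s[i]=='-':
--             c+=s[i]
--             continue
--         if s[i] in string.punctuation:
--             l.append(int(c))
--             c=""
--     l.append(int(c))
--     p=1
--     for i in l:
--         p*=i
--     return p
-- ===== SOURCE B (Python) =====
-- import string
--
-- SEPS = set(string.punctuation) - {'-'}
--
-- def multiply_nums(s):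
--     # one pass over indices: multiply in the slice since the last separator
--     p = 1
--     start = 0
--     for i, ch in enumerate(s):
--         if ch in SEPS:
--             p *= int(s[start:i])
--             start = i + 1
--     return p * int(s[start:])
-- ===== Notes on version B (the rewrite author's own statement) =====
-- stated objective: alternative
-- what changed: Instead of accumulating a character buffer and a list of ints char-by-char with three branch cases, B makes one pass keeping only a running product and the index after the last separator, multiplying in int(s[start:i]) at each separator (split-by-slices and fold, no list, no buffer).
-- outside the precondition, e.g. on multiply_nums('2*'): A raises ValueError, B raises ValueError; on multiply_nums('a'): A raises ValueError, B raises ValueError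
import Mathlib
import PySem

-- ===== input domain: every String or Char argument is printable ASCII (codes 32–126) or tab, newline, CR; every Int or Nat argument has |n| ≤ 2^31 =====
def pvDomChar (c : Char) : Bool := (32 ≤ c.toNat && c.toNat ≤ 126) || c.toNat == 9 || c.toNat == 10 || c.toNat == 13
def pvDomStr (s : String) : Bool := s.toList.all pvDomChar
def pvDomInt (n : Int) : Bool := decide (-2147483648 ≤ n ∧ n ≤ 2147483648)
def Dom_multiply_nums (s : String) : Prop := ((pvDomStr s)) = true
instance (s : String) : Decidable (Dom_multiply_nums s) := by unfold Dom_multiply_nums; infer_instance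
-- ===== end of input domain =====

-- B replaces A's char-by-char buffer + list-of-ints with one pass over indices keeping a
-- running product and the index after the last separator (slice-and-multiply); alternative, not faster.

-- ===== PORT A =====
-- string.punctuation
def pvPunct : List Char := "!\"#$%&'()*+,-./:;<=>?@[\\]^_`{|}~".toList

-- one iteration of A's loop, state = (l, c)
def pvStepA (st : List Int × List Char) (ch : Char) : List Int × List Char :=
  let l := st.1
  let c := if ch ∈ pvPunct then st.2 else st.2 ++ [ch]
  if ch = '-' then (l, c ++ [ch])
  else if ch ∈ pvPunct then (l ++ [(PySem.Int.ofChars? c).getD 0], [])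
  else (l, c)

def multiply_nums (s : String) : Int :=
  let st := s.toList.foldl pvStepA ([], [])
  let l := st.1 ++ [(PySem.Int.ofChars? st.2).getD 0]
  l.foldl (· * ·) 1

-- ===== PORT B =====
-- SEPS = set(string.punctuation) - {'-'}
def pvSeps : List Char := pvPunct.filter (fun ch => ch ≠ '-')

-- one iteration of B's loop over enumerate(s), state = (p, start)
def pvStepB (cs : List Char) (st : Int × Int) (ic : Int × Char) : Int × Int :=
  if ic.2 ∈ pvSeps then
    (st.1 * (PySem.Int.ofChars? (PySem.List.slice cs (some st.2) (some ic.1))).getD 0, ic.1 + 1)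
  else st

def multiply_nums_alt (s : String) : Int :=
  let cs := s.toList
  let st := (PySem.List.enumerate cs 0).foldl (pvStepB cs) (1, 0)
  st.1 * (PySem.Int.ofChars? (PySem.List.slice cs (some st.2) none)).getD 0

-- ===== PRECONDITION & SPEC =====
-- the segments of s between separator characters (punctuation other than '-'); '-' stays inside a segment
def pvTokens (cs : List Char) : List (List Char) :=
  cs.foldr (fun ch acc => if ch ∈ pvSeps then [] :: acc else (ch :: acc.headI) :: acc.tail) [[]]

-- A raises ValueError iff some segment is not a valid int() literal; exactly those inputs are excluded.
def Pre_multiply_nums (s : String) : Prop :=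
  ∀ t ∈ pvTokens s.toList, (PySem.Int.ofChars? t).isSome = true
instance (s : String) : Decidable (Pre_multiply_nums s) := by unfold Pre_multiply_nums; infer_instance

def pvWitness_multiply_nums : String := "10*-2, 3"

def Spec_multiply_nums (s : String) (out : Int) : Prop := out = multiply_nums_alt s
instance (s : String) (out : Int) : Decidable (Spec_multiply_nums s out) := by unfold Spec_multiply_nums; infer_instance

-- ===== CLAIM (what is proved, stated in full; the proofs are below) =====
def Claim_equal_multiply_nums : Prop := ∀ (s : String), Dom_multiply_nums s → Pre_multiply_nums s → Spec_multiply_nums s (multiply_nums s)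

-- ===== LEMMAS AND PROOFS =====

def pvIntD (t : List Char) : Int := (PySem.Int.ofChars? t).getD 0
def pvProdToks (ts : List (List Char)) : Int := (ts.map pvIntD).prod
def pvConsHead (c : List Char) (ts : List (List Char)) : List (List Char) := (c ++ ts.headI) :: ts.tail

lemma pvTokens_ne_nil (cs : List Char) : pvTokens cs ≠ [] := by
  induction cs with
  | nil => simp [pvTokens]
  | cons ch cs ih =>
    simp only [pvTokens, List.foldr_cons] at *
    split_ifs <;> simp

lemma pvTokens_cons (ch : Char) (cs : List Char) :
    pvTokens (ch :: cs) = if ch ∈ pvSeps then [] :: pvTokens cs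
      else (ch :: (pvTokens cs).headI) :: (pvTokens cs).tail := rfl

lemma pvConsHead_nil (ts : List (List Char)) (h : ts ≠ []) : pvConsHead [] ts = ts := by
  cases ts with
  | nil => exact absurd rfl h
  | cons a t => simp [pvConsHead]

lemma pvMem_seps (ch : Char) : ch ∈ pvSeps ↔ ch ∈ pvPunct ∧ ch ≠ '-' := by
  simp [pvSeps, List.mem_filter]

-- A's loop, with A's finishing step applied, computes the product of the tokens of the rest
lemma pvA_inv (cs : List Char) : ∀ (l : List Int) (c : List Char),
    ((cs.foldl pvStepA (l, c)).1 ++ [pvIntD (cs.foldl pvStepA (l, c)).2]).foldl (· * ·) 1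
      = l.foldl (· * ·) 1 * pvProdToks (pvConsHead c (pvTokens cs)) := by
  induction cs with
  | nil =>
    intro l c
    simp [pvTokens, pvConsHead, pvProdToks, List.foldl_append, pvIntD]
  | cons ch cs ih =>
    intro l c
    by_cases hs : ch ∈ pvSeps
    · have hp : ch ∈ pvPunct := ((pvMem_seps ch).mp hs).1
      have hd : ch ≠ '-' := ((pvMem_seps ch).mp hs).2
      simp only [List.foldl_cons, pvStepA, hp, hd, if_pos, if_false]
      rw [ih]
      rw [pvTokens_cons]
      simp only [hs, if_pos]
      rw [pvConsHead_nil _ (pvTokens_ne_nil cs)]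
      simp [pvProdToks, pvConsHead, List.foldl_append, pvIntD, mul_assoc]
    · rw [pvTokens_cons]
      simp only [hs, if_false]
      by_cases hd : ch = '-'
      · have hp : ch ∈ pvPunct := by subst hd; decide
        simp only [List.foldl_cons, pvStepA, hd, if_pos]
        rw [ih]
        subst hd
        simp [pvConsHead, hp]
      · have hp : ch ∉ pvPunct := fun h => hs ((pvMem_seps ch).mpr ⟨h, hd⟩)
        simp only [List.foldl_cons, pvStepA, hp, hd, if_false]
        rw [ih]
        simp [pvConsHead]

-- B's loop, with B's finishing step applied, computes the same product; the state is
-- tracked through the decomposition cs = front ++ pre ++ tail, start = |front|, k = |front ++ pre|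
lemma pvB_inv (tail : List Char) : ∀ (front pre : List Char) (p : Int),
    ((PySem.List.enumerate tail ((front ++ pre).length : Int)).foldl
        (pvStepB (front ++ pre ++ tail)) (p, (front.length : Int))).1
      * pvIntD (PySem.List.slice (front ++ pre ++ tail)
          (some ((PySem.List.enumerate tail ((front ++ pre).length : Int)).foldl
            (pvStepB (front ++ pre ++ tail)) (p, (front.length : Int))).2) none)
      = p * pvProdToks (pvConsHead pre (pvTokens tail)) := by
  induction tail with
  | nil =>
    intro front pre p
    simp only [PySem.List.enumerate_nil, List.foldl_nil, List.append_nil]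
    rw [PySem.List.slice_from_natCast]
    simp [pvTokens, pvConsHead, pvProdToks]
  | cons ch tail ih =>
    intro front pre p
    rw [PySem.List.enumerate_cons, List.foldl_cons]
    by_cases hs : ch ∈ pvSeps
    · simp only [pvStepB, hs, if_pos]
      have hslice : PySem.List.slice (front ++ pre ++ (ch :: tail))
          (some ((front.length : Nat) : Int)) (some (((front ++ pre).length : Nat) : Int))
          = pre := by
        rw [PySem.List.slice_natCast]
        rw [List.append_assoc, List.drop_left]
        simp
      have harr : front ++ pre ++ (ch :: tail) = (front ++ pre ++ [ch]) ++ tail := by simp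
      have hlen : ((front ++ pre).length : Int) + 1 = ((front ++ pre ++ [ch]).length : Int) := by
        simp; omega
      have ih' := ih (front ++ pre ++ [ch]) [] (p * pvIntD pre)
      simp only [List.append_nil, pvIntD] at ih'
      simp only [pvIntD]
      rw [hslice, harr, hlen, ih']
      rw [pvTokens_cons]
      simp only [hs, if_pos]
      rw [pvConsHead_nil _ (pvTokens_ne_nil tail)]
      simp [pvProdToks, pvConsHead, pvIntD, mul_assoc]
    · have hstep : pvStepB (front ++ pre ++ ch :: tail) (p, (front.length : Int))
          (((front ++ pre).length : Int), ch) = (p, (front.length : Int)) := by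
        simp [pvStepB, hs]
      rw [hstep]
      have harr : front ++ pre ++ (ch :: tail) = front ++ (pre ++ [ch]) ++ tail := by simp
      have hlen : ((front ++ pre).length : Int) + 1 = ((front ++ (pre ++ [ch])).length : Int) := by
        simp; omega
      rw [harr, hlen, ih front (pre ++ [ch]) p]
      rw [pvTokens_cons]
      simp only [hs, if_false]
      simp [pvConsHead]

lemma pvA_eq (s : String) : multiply_nums s = pvProdToks (pvTokens s.toList) := by
  have h := pvA_inv s.toList [] []
  simp only [pvIntD] at h
  simp only [multiply_nums]
  rw [h]
  rw [pvConsHead_nil _ (pvTokens_ne_nil s.toList)]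
  simp

lemma pvB_eq (s : String) : multiply_nums_alt s = pvProdToks (pvTokens s.toList) := by
  have h := pvB_inv s.toList [] [] 1
  simp only [pvIntD, List.nil_append, List.length_nil, Nat.cast_zero] at h
  simp only [multiply_nums_alt]
  rw [h]
  rw [pvConsHead_nil _ (pvTokens_ne_nil s.toList)]
  simp

-- ===== VERDICT (by name: the statement is the Claim_ definition above) =====
theorem multiply_nums_spec : Claim_equal_multiply_nums := by
  intro s _ _
  unfold Spec_multiply_nums
  rw [pvA_eq, pvB_eq]
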